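-- pv_equiv track=rewrite | github.com/siawase17/Baekjoon | 1343번.py | polyomino
-- ===== SOURCE A (Python) =====
-- def polyomino(board):
--     i = 0  # 문자열 인덱스
--     while i < len(board):
--         if board[i] == 'X':  # 'X'를 찾으면
--             if i+3 < len(board) and board[i+1:i+4] == 'XXX':  # 'XXXX'일 경우
--                 board = board[:i] + 'AAAA' + board[i+4:]
--                 i += 4
--             elif i+1 < len(board) and board[i+1:i+2] == 'X':  # 'XX'일 경우
--                 board = board[:i] + 'BB' + board[i+2:]
--                 i += 2
--             else:  # 변환할 수 없는 경우
--                 return "-1"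
--         else: # 인덱스값 . 인 경우
--             i += 1
--     return board
-- ===== SOURCE B (Python) =====
-- def _tile(run):
--     if run % 2:
--         return None
--     return 'AAAA' * (run // 4) + 'BB' * ((run % 4) // 2)
--
--
-- def polyomino(board):
--     res = ''
--     run = 0
--     for ch in board:
--         if ch == 'X':
--             run += 1
--         else:
--             t = _tile(run)
--             if t is None:
--                 return '-1'
--             res += t + ch
--             run = 0
--     t = _tile(run)
--     if t is None:
--         return '-1'
--     return res + t
-- ===== Notes on version B (the rewrite author's own statement) =====
-- stated objective: alternative
-- what changed: A greedily rewrites the board in place, re-slicing the whole string at each match and re-scanning from the new index; B makes one pass that counts each maximal run of 'X' and emits that run's tiling in closed form (full blocks of four, then one block of two, '-1' on an odd run), copying other characters through.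
import Mathlib
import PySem

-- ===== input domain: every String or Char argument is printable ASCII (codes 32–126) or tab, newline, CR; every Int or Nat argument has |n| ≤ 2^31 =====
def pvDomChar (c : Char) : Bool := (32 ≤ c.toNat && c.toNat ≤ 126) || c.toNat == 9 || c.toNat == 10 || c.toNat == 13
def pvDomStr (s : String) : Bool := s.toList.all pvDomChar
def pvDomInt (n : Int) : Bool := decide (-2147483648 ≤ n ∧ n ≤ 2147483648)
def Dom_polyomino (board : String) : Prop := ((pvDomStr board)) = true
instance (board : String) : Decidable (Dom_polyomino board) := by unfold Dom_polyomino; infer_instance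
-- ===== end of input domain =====

-- B replaces A's in-place greedy string rewriting (repeated re-slicing of the board) with a
-- single run-counting pass and a closed-form tiling per run (objective: alternative algorithm).

-- ===== PORT A =====
-- literal port of A's while loop: the board is re-built by slicing at each step,
-- i advances by 4 / 2 / 1; board[x:y] with x,y ≥ 0 is exactly take/drop here.
def polyAuxA (b : List Char) (i : Nat) : String :=
  if h : i < b.length then
    if b[i] = 'X' then
      if h4 : i + 3 < b.length ∧ (b.drop (i+1)).take 3 = ['X', 'X', 'X'] then
        polyAuxA (b.take i ++ ['A','A','A','A'] ++ b.drop (i+4)) (i+4)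
      else if h2 : i + 1 < b.length ∧ (b.drop (i+1)).take 1 = ['X'] then
        polyAuxA (b.take i ++ ['B','B'] ++ b.drop (i+2)) (i+2)
      else "-1"
    else polyAuxA b (i+1)
  else String.mk b
termination_by b.length - i
decreasing_by
  · have h1 : i ≤ b.length := Nat.le_of_lt h
    simp only [List.length_append, List.length_take, List.length_drop, List.length_cons,
      List.length_nil, Nat.min_eq_left h1]
    omega
  · have h1 : i ≤ b.length := Nat.le_of_lt h
    simp only [List.length_append, List.length_take, List.length_drop, List.length_cons,
      List.length_nil, Nat.min_eq_left h1]
    omega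
  · omega

def polyomino (board : String) : String := polyAuxA board.toList 0

-- ===== PORT B =====
-- port of Source B: _tile gives the closed-form tiling of an even run, else None
def tileB (run : Nat) : Option (List Char) :=
  if run % 2 = 1 then none
  else some ((List.replicate (run / 4) ['A','A','A','A']).flatten ++
             (List.replicate ((run % 4) / 2) ['B','B']).flatten)

-- the for-loop of Source B: res accumulator, run counter, flush a run at each non-'X'
def goB : List Char → List Char → Nat → String
  | [], res, run =>
    match tileB run with
    | none => "-1"
    | some t => String.mk (res ++ t)
  | c :: rest, res, run =>
    if c = 'X' then goB rest res (run + 1)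
    else
      match tileB run with
      | none => "-1"
      | some t => goB rest (res ++ t ++ [c]) 0

def polyomino_alt (board : String) : String := goB board.toList [] 0

-- ===== PRECONDITION & SPEC =====
def Spec_polyomino (board : String) (out : String) : Prop := out = polyomino_alt board
instance (board : String) (out : String) : Decidable (Spec_polyomino board out) := by unfold Spec_polyomino; infer_instance

-- ===== CLAIM (what is proved, stated in full; the proofs are below) =====
def Claim_equal_polyomino : Prop := ∀ (board : String), Dom_polyomino board → Spec_polyomino board (polyomino board)

-- ===== LEMMAS AND PROOFS =====

-- every list splits into a leading run of 'X' and a tail not starting with 'X'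
theorem runDecomp (l : List Char) :
    ∃ m s, l = List.replicate m 'X' ++ s ∧ (s = [] ∨ s.head? ≠ some 'X') := by
  induction l with
  | nil => exact ⟨0, [], rfl, Or.inl rfl⟩
  | cons c rest ih =>
    by_cases hc : c = 'X'
    · obtain ⟨m, s, hs, hb⟩ := ih
      by_cases hsx : s.head? = some 'X'
      · -- rest's boundary must already be clean, so this case needs hb
        rcases hb with h | h
        · subst h; simp at hsx
        · exact absurd hsx h
      · exact ⟨m + 1, s, by simp [List.replicate_succ, hs, hc], Or.inr hsx⟩
    · exact ⟨0, c :: rest, by simp, Or.inr (by simp [hc])⟩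

theorem goB_replicate (k : Nat) (s res : List Char) (r : Nat) :
    goB (List.replicate k 'X' ++ s) res r = goB s res (r + k) := by
  induction k generalizing r with
  | zero => simp
  | succ n ih =>
    simp only [List.replicate_succ, List.cons_append, goB, reduceIte]
    rw [ih]
    have : r + 1 + n = r + (n + 1) := by omega
    rw [this]

theorem tileB_four (m : Nat) (h : 4 ≤ m) :
    tileB m = Option.map (fun t => ['A','A','A','A'] ++ t) (tileB (m - 4)) := by
  unfold tileB
  have h2 : m % 2 = (m - 4) % 2 := by omega
  rw [h2]
  by_cases ho : (m - 4) % 2 = 1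
  · simp [ho]
  · have hq : m / 4 = (m - 4) / 4 + 1 := by omega
    have hr : m % 4 = (m - 4) % 4 := by omega
    simp [ho, hq, hr, List.replicate_succ]

theorem tileB_two (m : Nat) (h : m = 2 ∨ m = 3) :
    tileB m = Option.map (fun t => ['B','B'] ++ t) (tileB (m - 2)) := by
  rcases h with h | h <;> subst h <;> decide

theorem goB_shift (s res u : List Char) (r r' : Nat)
    (hb : s = [] ∨ s.head? ≠ some 'X')
    (ht : tileB r = Option.map (fun t => u ++ t) (tileB r')) :
    goB s (res ++ u) r' = goB s res r := by
  cases s with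
  | nil =>
    simp only [goB, ht]
    cases tileB r' with
    | none => rfl
    | some t => simp
  | cons c rest =>
    have hc : c ≠ 'X' := by
      rcases hb with h | h
      · exact absurd h (by simp)
      · simpa using h
    simp only [goB, if_neg hc, ht]
    cases tileB r' with
    | none => rfl
    | some t => simp

-- A at position acc.length on board (acc ++ X^m ++ s), s not starting with 'X',
-- computes exactly what B's loop computes with run counter m
theorem mainLemma (n : Nat) : ∀ (m : Nat) (s acc : List Char), m + s.length ≤ n →
    (s = [] ∨ s.head? ≠ some 'X') →
    polyAuxA (acc ++ List.replicate m 'X' ++ s) acc.length = goB s acc m := by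
  induction n with
  | zero =>
    intro m s acc hle hb
    have hm : m = 0 := by omega
    have hs : s = [] := by cases s <;> simp_all
    subst hm; subst hs
    simp only [List.replicate, List.append_nil]
    rw [polyAuxA]
    simp [goB, tileB]
  | succ n ih =>
    intro m s acc hle hb
    set b := acc ++ List.replicate m 'X' ++ s with hbdef
    have hlen : b.length = acc.length + m + s.length := by
      simp only [hbdef, List.length_append, List.length_replicate]
    have hdrop : ∀ k, k ≤ m → b.drop (acc.length + k) = List.replicate (m - k) 'X' ++ s := by
      intro k hk
      have h1 : b.drop (acc.length + k) = (List.replicate m 'X' ++ s).drop k := by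
        rw [hbdef, List.append_assoc, List.drop_append]
        simp [List.drop_eq_nil_of_le]
      rw [h1, List.drop_append, List.drop_replicate]
      have h2 : k - (List.replicate m 'X').length = 0 := by simp; omega
      rw [h2, List.drop_zero]
    have htake : b.take acc.length = acc := by
      rw [hbdef, List.append_assoc]
      exact List.take_left
    rcases Nat.lt_or_ge m 1 with hm0 | hm1
    · -- m = 0
      have hm : m = 0 := by omega
      subst hm
      cases s with
      | nil =>
        rw [polyAuxA]
        simp [hbdef, goB, tileB]
      | cons c rest =>
        have hc : c ≠ 'X' := by
          rcases hb with h | h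
          · exact absurd h (by simp)
          · simpa using h
        have hib : acc.length < b.length := by simp [hlen]
        have hget : b[acc.length]'hib = c := by
          simp [hbdef, List.getElem_append_right]
        rw [polyAuxA]
        rw [dif_pos hib]
        rw [if_neg (by rw [hget]; exact hc)]
        obtain ⟨m', s', hs', hb'⟩ := runDecomp rest
        have hre : b = (acc ++ [c]) ++ List.replicate m' 'X' ++ s' := by
          simp [hbdef, hs']
        have hi1 : acc.length + 1 = (acc ++ [c]).length := by simp
        rw [hre, hi1, ih m' s' (acc ++ [c]) (by
            have : m' + s'.length = rest.length := by
              have := congrArg List.length hs'; simp at this; omega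
            simp at hle; omega) hb']
        -- B side
        simp only [goB, if_neg hc, tileB]
        norm_num
        rw [hs', goB_replicate]
        simp
    · -- m ≥ 1 : current char is 'X'
      have hib : acc.length < b.length := by simp [hlen]; omega
      have hget : b[acc.length]'hib = 'X' := by
        have : (List.replicate m 'X' ++ s)[0]'(by simp; omega) = 'X' := by
          rw [List.getElem_append_left (by simpa using hm1)]
          simp
        simpa [hbdef, List.getElem_append_right] using this
      have hd1 : b.drop (acc.length + 1) = List.replicate (m - 1) 'X' ++ s := hdrop 1 hm1
      rcases Nat.lt_or_ge m 4 with hm4 | hm4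
      · rcases Nat.lt_or_ge m 2 with hm2 | hm2
        · -- m = 1 : both conditions fail, A returns "-1"
          have hm : m = 1 := by omega
          subst hm
          simp only [List.replicate, List.nil_append] at hd1
          have hns : (s.take 3 ≠ ['X','X','X']) ∧ (s.take 1 ≠ ['X']) := by
            rcases hb with h | h
            · subst h; simp
            · cases s with
              | nil => simp
              | cons c r =>
                have : c ≠ 'X' := by simpa using h
                constructor <;> simp [List.take_succ_cons] <;> intro hh <;> simp_all
          rw [polyAuxA, dif_pos hib, if_pos hget,
              dif_neg (by rw [hd1]; exact fun hh => hns.1 hh.2),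
              dif_neg (by rw [hd1]; exact fun hh => hns.2 hh.2)]
          cases s with
          | nil => simp [goB, tileB]
          | cons c rest =>
            have hc : c ≠ 'X' := by
              rcases hb with h | h
              · exact absurd h (by simp)
              · simpa using h
            simp [goB, if_neg hc, tileB]
        · -- m = 2 or 3 : 'XX' branch
          have hcond4 : ¬ (acc.length + 3 < b.length ∧ (b.drop (acc.length+1)).take 3 = ['X','X','X']) := by
            rintro ⟨-, hsl⟩
            rw [hd1] at hsl
            interval_cases m
            · -- m = 2: take 3 (X :: s) = XXX forces s to start with X
              simp only [List.replicate, List.nil_append,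
                List.cons_append, List.take_succ_cons] at hsl
              rcases hb with h | h
              · subst h; simp at hsl
              · cases s with
                | nil => simp at hsl
                | cons c r => simp [List.take_succ_cons] at hsl; simp [hsl.1] at h
            · simp only [List.replicate, List.nil_append,
                List.cons_append, List.take_succ_cons] at hsl
              rcases hb with h | h
              · subst h; simp at hsl
              · cases s with
                | nil => simp at hsl
                | cons c r => simp [List.take_succ_cons] at hsl; simp [hsl] at h
          have hcond2 : acc.length + 1 < b.length ∧ (b.drop (acc.length+1)).take 1 = ['X'] := by
            constructor
            · simp [hlen]; omega
            · rw [hd1]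
              have : 1 ≤ m - 1 := by omega
              cases hmm : m - 1 with
              | zero => omega
              | succ k => simp [List.replicate_succ, List.take_succ_cons]
          rw [polyAuxA, dif_pos hib, if_pos hget, dif_neg hcond4, dif_pos hcond2]
          have hd2 : b.drop (acc.length + 2) = List.replicate (m - 2) 'X' ++ s := hdrop 2 hm2
          have hre : b.take acc.length ++ ['B','B'] ++ b.drop (acc.length + 2)
              = (acc ++ ['B','B']) ++ List.replicate (m - 2) 'X' ++ s := by
            rw [htake, hd2]; simp
          have hi2 : acc.length + 2 = (acc ++ ['B','B']).length := by simp
          rw [hre, hi2, ih (m - 2) s (acc ++ ['B','B']) (by omega) hb]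
          exact goB_shift s acc ['B','B'] m (m - 2) hb (tileB_two m (by omega))
      · -- m ≥ 4 : 'XXXX' branch
        have hcond4 : acc.length + 3 < b.length ∧ (b.drop (acc.length+1)).take 3 = ['X','X','X'] := by
          constructor
          · simp [hlen]; omega
          · rw [hd1]
            obtain ⟨k, hk⟩ : ∃ k, m - 1 = 3 + k := ⟨m - 4, by omega⟩
            rw [hk, List.replicate_add]
            simp [List.replicate, List.take_succ_cons]
        rw [polyAuxA, dif_pos hib, if_pos hget, dif_pos hcond4]
        have hd4 : b.drop (acc.length + 4) = List.replicate (m - 4) 'X' ++ s := hdrop 4 hm4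
        have hre : b.take acc.length ++ ['A','A','A','A'] ++ b.drop (acc.length + 4)
            = (acc ++ ['A','A','A','A']) ++ List.replicate (m - 4) 'X' ++ s := by
          rw [htake, hd4]; simp
        have hi4 : acc.length + 4 = (acc ++ ['A','A','A','A']).length := by simp
        rw [hre, hi4, ih (m - 4) s (acc ++ ['A','A','A','A']) (by omega) hb]
        exact goB_shift s acc ['A','A','A','A'] m (m - 4) hb (tileB_four m hm4)

-- ===== VERDICT (by name: the statement is the Claim_ definition above) =====
theorem polyomino_spec : Claim_equal_polyomino := by
  intro board _
  unfold Spec_polyomino polyomino polyomino_alt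
  obtain ⟨m, s, hs, hb⟩ := runDecomp board.toList
  have h0 : (([] : List Char)).length = 0 := rfl
  calc polyAuxA board.toList 0
      = polyAuxA ([] ++ List.replicate m 'X' ++ s) ([] : List Char).length := by
        rw [hs]; rfl
    _ = goB s [] m := mainLemma (m + s.length) m s [] (le_refl _) hb
    _ = goB board.toList [] 0 := by rw [hs, goB_replicate]; ring_nf
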